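-- pv_equiv track=rewrite | github.com/chshersh/university-courses | math-logic-course/deduction/main.py | backterm_skip
-- ===== SOURCE A (Python) =====
-- def backterm_skip(state, stop_character):
--     pos = len(state) - 1
--     while pos >= 0:
--         if state[pos] == stop_character: return pos
--         if state[pos] == ')':
--             pos, balance = pos - 1, -1
--             while pos >= 0 and balance < 0:
--                 balance += state[pos] == '(' and 1 or state[pos] == ')' and -1 or 0
--                 pos -= 1
--         else: pos -= 1
--     return 0  # can't stop at zero position
-- ===== SOURCE B (Python) =====
-- def backterm_skip(state, stop_character):
--     depth = 0
--     for pos in range(len(state) - 1, -1, -1):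
--         c = state[pos]
--         if depth == 0:
--             if c == stop_character:
--                 return pos
--             if c == ')':
--                 depth = 1
--         elif c == ')':
--             depth += 1
--         elif c == '(':
--             depth -= 1
--     return 0
-- ===== Notes on version B (the rewrite author's own statement) =====
-- stated objective: simpler
-- what changed: A's nested structure (outer scan plus an inner balance-skipping while-loop) is flattened into a single backward pass that threads one integer nesting-depth counter, checking the stop character only at depth 0.
import Mathlib
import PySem

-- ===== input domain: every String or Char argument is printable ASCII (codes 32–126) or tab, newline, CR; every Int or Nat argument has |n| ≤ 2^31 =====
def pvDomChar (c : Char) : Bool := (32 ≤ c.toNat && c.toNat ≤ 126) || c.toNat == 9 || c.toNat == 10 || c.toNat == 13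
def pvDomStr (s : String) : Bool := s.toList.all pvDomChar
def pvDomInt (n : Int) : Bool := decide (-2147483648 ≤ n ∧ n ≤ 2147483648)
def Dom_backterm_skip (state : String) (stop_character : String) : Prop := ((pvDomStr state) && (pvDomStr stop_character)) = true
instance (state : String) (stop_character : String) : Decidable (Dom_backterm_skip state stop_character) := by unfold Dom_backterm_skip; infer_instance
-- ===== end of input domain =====

-- B replaces A's nested skip-loop (inner balance loop) with one flat backward pass
-- threading an explicit nesting-depth counter; objective: simpler, same cost.

-- ===== PORT A =====
-- inner 'while pos >= 0 and balance < 0' loop of A, walking the reversed remainder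
-- (rs is the list of characters state[pos], state[pos-1], …; returns the remaining
-- reversed characters together with the final pos, exactly as the Python loop leaves pos).
def pvAInner : List Char → Int → Int → (List Char × Int)
  | [], pos, _ => ([], pos)
  | c :: rs, pos, balance =>
    if balance < 0 then
      pvAInner rs (pos - 1)
        (balance + (if c = '(' then 1 else if c = ')' then (-1) else 0))
    else (c :: rs, pos)

lemma pvAInner_fst_length_le : ∀ (rs : List Char) (pos balance : Int),
    (pvAInner rs pos balance).1.length ≤ rs.length := by
  intro rs
  induction rs with
  | nil => intro pos balance; simp [pvAInner]
  | cons c rs ih =>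
    intro pos balance
    simp only [pvAInner]
    split
    · exact le_trans (ih _ _) (Nat.le_succ _)
    · simp

-- outer 'while pos >= 0' loop of A over the reversed characters.
def pvAOuter (stop : List Char) : List Char → Int → Int
  | [], _ => 0
  | c :: rs, pos =>
    if stop = [c] then pos
    else if c = ')' then
      pvAOuter stop (pvAInner rs (pos - 1) (-1)).1 (pvAInner rs (pos - 1) (-1)).2
    else pvAOuter stop rs (pos - 1)
termination_by rs _ => rs.length
decreasing_by
  · exact Nat.lt_succ_of_le (pvAInner_fst_length_le _ _ _)
  · exact Nat.lt_succ_self _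

def backterm_skip (state : String) (stop_character : String) : Int :=
  pvAOuter stop_character.toList state.toList.reverse ((state.toList.length : Int) - 1)

-- ===== PORT B =====
-- single backward pass with a depth counter (Source B's for-loop over range(len-1,-1,-1)).
def pvBLoop (stop : List Char) : List Char → Int → Int → Int
  | [], _, _ => 0
  | c :: rs, pos, depth =>
    if depth = 0 then
      if stop = [c] then pos
      else pvBLoop stop rs (pos - 1) (if c = ')' then 1 else 0)
    else pvBLoop stop rs (pos - 1)
      (if c = ')' then depth + 1 else if c = '(' then depth - 1 else depth)

def backterm_skip_alt (state : String) (stop_character : String) : Int :=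
  pvBLoop stop_character.toList state.toList.reverse ((state.toList.length : Int) - 1) 0

-- ===== PRECONDITION & SPEC =====
def Spec_backterm_skip (state : String) (stop_character : String) (out : Int) : Prop := out = backterm_skip_alt state stop_character
instance (state : String) (stop_character : String) (out : Int) : Decidable (Spec_backterm_skip state stop_character out) := by unfold Spec_backterm_skip; infer_instance

-- ===== CLAIM (what is proved, stated in full; the proofs are below) =====
def Claim_equal_backterm_skip : Prop := ∀ (state : String) (stop_character : String), Dom_backterm_skip state stop_character → Spec_backterm_skip state stop_character (backterm_skip state stop_character)

-- ===== LEMMAS AND PROOFS =====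

lemma pvAInner_zero (rs : List Char) (pos : Int) : pvAInner rs pos 0 = (rs, pos) := by
  cases rs <;> simp [pvAInner]

-- joint loop invariant: the outer loop of A agrees with B at depth 0, and after A's
-- inner loop (entered with balance b < 0) A agrees with B at depth -b.
lemma pvKey (stop : List Char) : ∀ (rs : List Char) (pos : Int),
    (pvAOuter stop rs pos = pvBLoop stop rs pos 0) ∧
    (∀ b : Int, b < 0 →
      pvAOuter stop (pvAInner rs pos b).1 (pvAInner rs pos b).2 = pvBLoop stop rs pos (-b)) := by
  intro rs
  induction rs with
  | nil =>
    intro pos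
    constructor
    · simp [pvAOuter, pvBLoop]
    · intro b hb
      simp [pvAInner, pvAOuter, pvBLoop]
  | cons c rs ih =>
    intro pos
    constructor
    · rw [pvAOuter]
      by_cases hstop : stop = [c]
      · simp [pvBLoop, hstop]
      · by_cases hc : c = ')'
        · subst hc
          rw [if_neg hstop, if_pos rfl, pvBLoop]
          have h := (ih (pos - 1)).2 (-1) (by norm_num)
          simpa [hstop] using h
        · rw [if_neg hstop, if_neg hc, pvBLoop]
          simpa [hstop, hc] using (ih (pos - 1)).1
    · intro b hb
      have hbne : ¬ (-b = 0) := by omega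
      rw [pvBLoop, if_neg hbne]
      rw [pvAInner, if_pos hb]
      set δ : Int := (if c = '(' then 1 else if c = ')' then (-1) else 0) with hδ
      by_cases hb' : b + δ < 0
      · have h := (ih (pos - 1)).2 (b + δ) hb'
        rw [h]
        congr 1
        by_cases hc1 : c = ')'
        · simp [hδ, hc1]; ring
        · by_cases hc2 : c = '('
          · simp [hδ, hc2]; ring
          · simp [hδ, hc1, hc2]
      · -- balance reached 0: b = -1 and c = '(' (δ = 1)
        have hc2 : c = '(' := by
          by_contra hc2
          have : δ ≤ 0 := by
            by_cases hc1 : c = ')' <;> simp [hδ, hc1, hc2]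
          omega
        have hb1 : b = -1 := by
          have : δ = 1 := by simp [hδ, hc2]
          omega
        have hδ1 : b + δ = 0 := by
          have : δ = 1 := by simp [hδ, hc2]
          omega
        rw [hδ1, pvAInner_zero]
        have h := (ih (pos - 1)).1
        rw [h]
        congr 1
        subst hb1
        simp [hc2]

-- ===== VERDICT (by name: the statement is the Claim_ definition above) =====
theorem backterm_skip_spec : Claim_equal_backterm_skip := by
  intro state stop_character _
  unfold Spec_backterm_skip backterm_skip backterm_skip_alt
  exact (pvKey stop_character.toList state.toList.reverse _).1
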